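-- pv_equiv track=rewrite | github.com/travisdw72/onevault_api | database/scripts/Production_ready_assesment/database_function_analyzer.py | analyze_api_endpoints
-- ===== SOURCE A (Python) =====
-- from typing import Dict, List, Any, Optional
--
-- def analyze_api_endpoints(functions: List[Dict[str, Any]]) -> Dict[str, Any]:
--     """Analyze API endpoint functions"""
--     api_functions = [f for f in functions if f['schema_name'] == 'api']
--
--     endpoints = {
--         'authentication': [],
--         'business_operations': [],
--         'admin_functions': [],
--         'ai_operations': [],
--         'monitoring': [],
--         'other': []
--     }
--
--     for func in api_functions:
--         name = func['function_name']
--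
--         if any(keyword in name.lower() for keyword in ['auth', 'login', 'session', 'token']):
--             endpoints['authentication'].append(func)
--         elif any(keyword in name.lower() for keyword in ['admin', 'reset', 'manage']):
--             endpoints['admin_functions'].append(func)
--         elif any(keyword in name.lower() for keyword in ['ai_', 'agent', 'chat']):
--             endpoints['ai_operations'].append(func)
--         elif any(keyword in name.lower() for keyword in ['monitor', 'alert', 'health']):
--             endpoints['monitoring'].append(func)
--         elif any(keyword in name.lower() for keyword in ['business', 'entity', 'transaction']):
--             endpoints['business_operations'].append(func)
--         else:
--             endpoints['other'].append(func)
--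
--     return endpoints
-- ===== SOURCE B (Python) =====
-- def _split(pool, keywords):
--     """One sieve pass: functions whose lowered name contains a keyword, and the rest."""
--     hit, miss = [], []
--     for f in pool:
--         name = f['function_name'].lower()
--         if any(k in name for k in keywords):
--             hit.append(f)
--         else:
--             miss.append(f)
--     return hit, miss
--
--
-- def analyze_api_endpoints(functions):
--     """Analyze API endpoint functions"""
--     pool = [f for f in functions if f['schema_name'] == 'api']
--     authentication, pool = _split(pool, ['auth', 'login', 'session', 'token'])
--     admin_functions, pool = _split(pool, ['admin', 'reset', 'manage'])
--     ai_operations, pool = _split(pool, ['ai_', 'agent', 'chat'])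
--     monitoring, pool = _split(pool, ['monitor', 'alert', 'health'])
--     business_operations, pool = _split(pool, ['business', 'entity', 'transaction'])
--     return {
--         'authentication': authentication,
--         'business_operations': business_operations,
--         'admin_functions': admin_functions,
--         'ai_operations': ai_operations,
--         'monitoring': monitoring,
--         'other': pool,
--     }
-- ===== Notes on version B (the rewrite author's own statement) =====
-- stated objective: alternative
-- what changed: Replaces A's single pass that classifies each function through a six-way if/elif cascade with a staged sieve: five successive partition passes over a shrinking pool, each peeling off one category's matches, the final remainder being 'other'.
import Mathlib
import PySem

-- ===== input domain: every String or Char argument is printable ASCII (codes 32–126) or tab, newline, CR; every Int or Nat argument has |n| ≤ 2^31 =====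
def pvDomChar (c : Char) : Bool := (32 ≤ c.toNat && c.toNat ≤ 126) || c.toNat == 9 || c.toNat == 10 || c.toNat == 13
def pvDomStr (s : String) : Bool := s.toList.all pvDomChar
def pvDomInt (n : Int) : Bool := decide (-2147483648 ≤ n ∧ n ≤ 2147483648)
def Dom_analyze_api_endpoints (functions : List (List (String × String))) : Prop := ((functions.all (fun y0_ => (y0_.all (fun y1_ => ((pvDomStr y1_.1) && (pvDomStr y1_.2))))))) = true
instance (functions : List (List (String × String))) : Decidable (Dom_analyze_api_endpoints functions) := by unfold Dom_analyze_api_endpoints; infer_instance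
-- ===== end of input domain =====

-- B replaces A's single-pass six-way if/elif classification by a staged sieve of five
-- partition passes over a shrinking pool; same return value, no speed claim.


-- f[k] for a dict with the key present (Pre_ guarantees presence where the ports use it)
def pvGetStr (f : List (String × String)) (k : String) : String :=
  ((PySem.Dict.mk f).get? k).getD ""

-- any(keyword in name.lower() for keyword in kws)  (both Pythons use this same test)
def pvKwHit (name : String) (kws : List String) : Bool :=
  kws.any (fun kw => PySem.Str.isIn kw (PySem.Str.lower name))

-- ===== PORT A =====
def analyze_api_endpoints (functions : List (List (String × String))) : List (String × List (List (String × String))) :=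
  let api_functions := functions.filter (fun f => pvGetStr f "schema_name" == "api")
  let endpoints : PySem.Dict String (List (List (String × String))) :=
    PySem.Dict.ofList [("authentication", []), ("business_operations", []), ("admin_functions", []),
                       ("ai_operations", []), ("monitoring", []), ("other", [])]
  let endpoints := api_functions.foldl (fun d func =>
    let name := pvGetStr func "function_name"
    if pvKwHit name ["auth", "login", "session", "token"] then d.modify "authentication" [] (· ++ [func])
    else if pvKwHit name ["admin", "reset", "manage"] then d.modify "admin_functions" [] (· ++ [func])
    else if pvKwHit name ["ai_", "agent", "chat"] then d.modify "ai_operations" [] (· ++ [func])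
    else if pvKwHit name ["monitor", "alert", "health"] then d.modify "monitoring" [] (· ++ [func])
    else if pvKwHit name ["business", "entity", "transaction"] then d.modify "business_operations" [] (· ++ [func])
    else d.modify "other" [] (· ++ [func])) endpoints
  endpoints.items

-- ===== PORT B =====
-- _split: one sieve pass, appending each function to hit or miss
def pvSplit (pool : List (List (String × String))) (keywords : List String) :
    List (List (String × String)) × List (List (String × String)) :=
  pool.foldl (fun acc f =>
    if pvKwHit (pvGetStr f "function_name") keywords then (acc.1 ++ [f], acc.2)
    else (acc.1, acc.2 ++ [f])) ([], [])

def analyze_api_endpoints_alt (functions : List (List (String × String))) : List (String × List (List (String × String))) :=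
  let pool0 := functions.filter (fun f => pvGetStr f "schema_name" == "api")
  let s1 := pvSplit pool0 ["auth", "login", "session", "token"]
  let s2 := pvSplit s1.2 ["admin", "reset", "manage"]
  let s3 := pvSplit s2.2 ["ai_", "agent", "chat"]
  let s4 := pvSplit s3.2 ["monitor", "alert", "health"]
  let s5 := pvSplit s4.2 ["business", "entity", "transaction"]
  [("authentication", s1.1), ("business_operations", s5.1), ("admin_functions", s2.1),
   ("ai_operations", s3.1), ("monitoring", s4.1), ("other", s5.2)]

-- ===== PRECONDITION & SPEC =====
-- Pre_ excludes dicts missing the keys A subscripts (KeyError in both Pythons) and assoc lists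
-- with duplicate keys, which cannot arise from a Python dict.
def Pre_analyze_api_endpoints (functions : List (List (String × String))) : Prop :=
  ∀ f ∈ functions, (f.map Prod.fst).Nodup ∧ (PySem.Dict.mk f).contains "schema_name" = true ∧
    ((PySem.Dict.mk f).get? "schema_name" = some "api" → (PySem.Dict.mk f).contains "function_name" = true)
instance (functions : List (List (String × String))) : Decidable (Pre_analyze_api_endpoints functions) := by unfold Pre_analyze_api_endpoints; infer_instance

def pvWitness_analyze_api_endpoints : (List (List (String × String))) :=
  [[("schema_name", "api"), ("function_name", "auth_login_user")],
   [("schema_name", "util"), ("function_name", "helper")]]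

def Spec_analyze_api_endpoints (functions : List (List (String × String))) (out : List (String × List (List (String × String)))) : Prop := out = analyze_api_endpoints_alt functions
instance (functions : List (List (String × String))) (out : List (String × List (List (String × String)))) : Decidable (Spec_analyze_api_endpoints functions out) := by unfold Spec_analyze_api_endpoints; infer_instance

-- ===== CLAIM (what is proved, stated in full; the proofs are below) =====
def Claim_equal_analyze_api_endpoints : Prop := ∀ (functions : List (List (String × String))), Dom_analyze_api_endpoints functions → Pre_analyze_api_endpoints functions → Spec_analyze_api_endpoints functions (analyze_api_endpoints functions)

-- ===== LEMMAS AND PROOFS =====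

-- the category A's cascade assigns to a name (proof-side characterisation)
def pvCategory (n : String) : String :=
  if pvKwHit n ["auth", "login", "session", "token"] then "authentication"
  else if pvKwHit n ["admin", "reset", "manage"] then "admin_functions"
  else if pvKwHit n ["ai_", "agent", "chat"] then "ai_operations"
  else if pvKwHit n ["monitor", "alert", "health"] then "monitoring"
  else if pvKwHit n ["business", "entity", "transaction"] then "business_operations"
  else "other"

def pvKeyOf (f : List (String × String)) : String := pvCategory (pvGetStr f "function_name")

def pvCategories : List String :=
  ["authentication", "business_operations", "admin_functions", "ai_operations", "monitoring", "other"]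

theorem pvCategory_mem (n : String) : pvCategory n ∈ pvCategories := by
  unfold pvCategory
  split_ifs <;> simp [pvCategories]

def pvD0 : PySem.Dict String (List (List (String × String))) :=
  PySem.Dict.ofList [("authentication", []), ("business_operations", []), ("admin_functions", []),
                     ("ai_operations", []), ("monitoring", []), ("other", [])]

-- A's loop body (the if/elif cascade of modifies) is `modify` at the cascade's category
theorem foldl_cascade (l : List (List (String × String))) (d : PySem.Dict String (List (List (String × String)))) :
    l.foldl (fun d func =>
      if pvKwHit (pvGetStr func "function_name") ["auth", "login", "session", "token"] then d.modify "authentication" [] (· ++ [func])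
      else if pvKwHit (pvGetStr func "function_name") ["admin", "reset", "manage"] then d.modify "admin_functions" [] (· ++ [func])
      else if pvKwHit (pvGetStr func "function_name") ["ai_", "agent", "chat"] then d.modify "ai_operations" [] (· ++ [func])
      else if pvKwHit (pvGetStr func "function_name") ["monitor", "alert", "health"] then d.modify "monitoring" [] (· ++ [func])
      else if pvKwHit (pvGetStr func "function_name") ["business", "entity", "transaction"] then d.modify "business_operations" [] (· ++ [func])
      else d.modify "other" [] (· ++ [func])) d
    = l.foldl (fun d func => d.modify (pvKeyOf func) [] (· ++ [func])) d := by
  congr 1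
  funext d func
  rw [pvKeyOf, pvCategory]
  split_ifs <;> rfl

theorem pvD0_getD (c : String) (hc : c ∈ pvCategories) :
    pvD0.getD c [] = ([] : List (List (String × String))) := by
  fin_cases hc <;> rfl

-- A's result: each category paired with the api functions the cascade assigns to it
theorem a_eq (functions : List (List (String × String))) :
    analyze_api_endpoints functions
      = pvCategories.map (fun c =>
          (c, (functions.filter (fun f => pvGetStr f "schema_name" == "api")).filter
                (fun f => pvKeyOf f == c))) := by
  unfold analyze_api_endpoints
  dsimp only
  rw [show PySem.Dict.ofList [("authentication", ([] : List (List (String × String)))), ("business_operations", []), ("admin_functions", []),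
        ("ai_operations", []), ("monitoring", []), ("other", [])] = pvD0 from rfl]
  set api := functions.filter (fun f => pvGetStr f "schema_name" == "api") with hapi
  rw [foldl_cascade]
  have hD : api.foldl (fun d func => d.modify (pvKeyOf func) [] (· ++ [func])) pvD0
      = (api.map (fun f => (pvKeyOf f, f))).foldl (fun d p => d.modify p.1 [] (· ++ [p.2])) pvD0 := by
    rw [List.foldl_map]
  rw [hD]
  set D := (api.map (fun f => (pvKeyOf f, f))).foldl (fun d p => d.modify p.1 [] (· ++ [p.2])) pvD0 with hDdef
  have hnodup : D.keys.Nodup := by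
    rw [hDdef]
    exact PySem.Dict.nodup_keys_foldl_modify_key _ _ _ _ _ (by decide)
  have hkeys : D.keys = pvCategories := by
    rw [hDdef, PySem.Dict.keys_foldl_modify_key, PySem.Set.update_eq_append_filter]
    have : (PySem.Set.ofList ((api.map (fun f => (pvKeyOf f, f))).map Prod.fst)).filter
        (fun y => !(PySem.Set.contains pvD0.keys y)) = [] := by
      rw [List.filter_eq_nil_iff]
      intro a ha
      have ha' := (PySem.Set.mem_ofList _ _).mp ha
      simp only [List.map_map, List.mem_map, Function.comp_def] at ha'
      obtain ⟨g, -, rfl⟩ := ha'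
      have hk : pvD0.keys = pvCategories := rfl
      simp only [Bool.not_eq_true', Bool.not_eq_false, PySem.Set.contains_iff, hk]
      exact pvCategory_mem _
    rw [this, List.append_nil]
    rfl
  rw [PySem.Dict.items_eq_map_keys D hnodup [], hkeys]
  apply List.map_congr_left
  intro c hc
  rw [hDdef, PySem.Dict.getD_foldl_modify_append, pvD0_getD c hc, List.nil_append]
  simp [List.filter_map, List.map_map, Function.comp_def]

-- B's sieve pass is a pair of filters
theorem pvSplit_eq (pool : List (List (String × String))) (kws : List String) :
    pvSplit pool kws
      = (pool.filter (fun f => pvKwHit (pvGetStr f "function_name") kws),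
         pool.filter (fun f => !pvKwHit (pvGetStr f "function_name") kws)) := by
  unfold pvSplit
  have h : (fun (acc : List (List (String × String)) × List (List (String × String))) f =>
      if pvKwHit (pvGetStr f "function_name") kws then (acc.1 ++ [f], acc.2)
      else (acc.1, acc.2 ++ [f]))
    = fun acc f =>
      ((if pvKwHit (pvGetStr f "function_name") kws then acc.1 ++ [f] else acc.1),
       (if !pvKwHit (pvGetStr f "function_name") kws then acc.2 ++ [f] else acc.2)) := by
    funext acc f
    by_cases h : pvKwHit (pvGetStr f "function_name") kws <;> simp [h]
  rw [h,
    PySem.List.foldl_prod_mk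
      (f := fun a f => if pvKwHit (pvGetStr f "function_name") kws then a ++ [f] else a)
      (g := fun a f => if !pvKwHit (pvGetStr f "function_name") kws then a ++ [f] else a),
    PySem.List.foldl_append_if_eq_filter, PySem.List.foldl_append_if_eq_filter]
  simp

-- the six bucket equalities: A's per-category filter equals B's sieve stage
theorem cat1 (api : List (List (String × String))) :
    api.filter (fun f => pvKeyOf f == "authentication") = (List.filter (fun f => pvKwHit (pvGetStr f "function_name") ["auth", "login", "session", "token"]) api) := by
  apply List.filter_congr
  intro f _
  simp only [pvKeyOf, pvCategory]
  split_ifs <;> simp_all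

theorem cat2 (api : List (List (String × String))) :
    api.filter (fun f => pvKeyOf f == "admin_functions") = (List.filter (fun f => pvKwHit (pvGetStr f "function_name") ["admin", "reset", "manage"]) (List.filter (fun f => !pvKwHit (pvGetStr f "function_name") ["auth", "login", "session", "token"]) api)) := by
  rw [List.filter_filter]
  apply List.filter_congr
  intro f _
  simp only [pvKeyOf, pvCategory]
  split_ifs <;> simp_all

theorem cat3 (api : List (List (String × String))) :
    api.filter (fun f => pvKeyOf f == "ai_operations") = (List.filter (fun f => pvKwHit (pvGetStr f "function_name") ["ai_", "agent", "chat"]) (List.filter (fun f => !pvKwHit (pvGetStr f "function_name") ["admin", "reset", "manage"]) (List.filter (fun f => !pvKwHit (pvGetStr f "function_name") ["auth", "login", "session", "token"]) api))) := by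
  rw [List.filter_filter]
  rw [List.filter_filter]
  apply List.filter_congr
  intro f _
  simp only [pvKeyOf, pvCategory]
  split_ifs <;> simp_all

theorem cat4 (api : List (List (String × String))) :
    api.filter (fun f => pvKeyOf f == "monitoring") = (List.filter (fun f => pvKwHit (pvGetStr f "function_name") ["monitor", "alert", "health"]) (List.filter (fun f => !pvKwHit (pvGetStr f "function_name") ["ai_", "agent", "chat"]) (List.filter (fun f => !pvKwHit (pvGetStr f "function_name") ["admin", "reset", "manage"]) (List.filter (fun f => !pvKwHit (pvGetStr f "function_name") ["auth", "login", "session", "token"]) api)))) := by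
  rw [List.filter_filter]
  rw [List.filter_filter]
  rw [List.filter_filter]
  apply List.filter_congr
  intro f _
  simp only [pvKeyOf, pvCategory]
  split_ifs <;> simp_all

theorem cat5 (api : List (List (String × String))) :
    api.filter (fun f => pvKeyOf f == "business_operations") = (List.filter (fun f => pvKwHit (pvGetStr f "function_name") ["business", "entity", "transaction"]) (List.filter (fun f => !pvKwHit (pvGetStr f "function_name") ["monitor", "alert", "health"]) (List.filter (fun f => !pvKwHit (pvGetStr f "function_name") ["ai_", "agent", "chat"]) (List.filter (fun f => !pvKwHit (pvGetStr f "function_name") ["admin", "reset", "manage"]) (List.filter (fun f => !pvKwHit (pvGetStr f "function_name") ["auth", "login", "session", "token"]) api))))) := by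
  rw [List.filter_filter]
  rw [List.filter_filter]
  rw [List.filter_filter]
  rw [List.filter_filter]
  apply List.filter_congr
  intro f _
  simp only [pvKeyOf, pvCategory]
  split_ifs <;> simp_all

theorem cat6 (api : List (List (String × String))) :
    api.filter (fun f => pvKeyOf f == "other") = (List.filter (fun f => !pvKwHit (pvGetStr f "function_name") ["business", "entity", "transaction"]) (List.filter (fun f => !pvKwHit (pvGetStr f "function_name") ["monitor", "alert", "health"]) (List.filter (fun f => !pvKwHit (pvGetStr f "function_name") ["ai_", "agent", "chat"]) (List.filter (fun f => !pvKwHit (pvGetStr f "function_name") ["admin", "reset", "manage"]) (List.filter (fun f => !pvKwHit (pvGetStr f "function_name") ["auth", "login", "session", "token"]) api))))) := by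
  rw [List.filter_filter]
  rw [List.filter_filter]
  rw [List.filter_filter]
  rw [List.filter_filter]
  apply List.filter_congr
  intro f _
  simp only [pvKeyOf, pvCategory]
  split_ifs <;> simp_all

theorem ab_eq (functions : List (List (String × String))) :
    analyze_api_endpoints functions = analyze_api_endpoints_alt functions := by
  rw [a_eq]
  unfold analyze_api_endpoints_alt
  dsimp only
  set api := functions.filter (fun f => pvGetStr f "schema_name" == "api") with hapi
  rw [pvSplit_eq, pvSplit_eq, pvSplit_eq, pvSplit_eq, pvSplit_eq]
  dsimp only
  simp only [pvCategories, List.map_cons, List.map_nil]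
  rw [cat1 api, cat2 api, cat3 api, cat4 api, cat5 api, cat6 api]

-- ===== VERDICT (by name: the statement is the Claim_ definition above) =====
theorem analyze_api_endpoints_spec : Claim_equal_analyze_api_endpoints := by
  intro functions _ _
  exact ab_eq functions
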